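-- pv_equiv track=rewrite | github.com/T0nyX1ang/noqx | solver/core/common.py | fill_num
-- ===== SOURCE A (Python) =====
-- from typing import Iterable, Optional, Tuple, Union
--
-- def fill_num(_range: Iterable[int], _type: str = "grid", _id: Union[int, str] = "A", color: Optional[str] = None) -> str:
--     """
--     Generate a rule that a cell numbered within {_range}.
--     {_range} should have the format "low..high", or "x;y;z" for a list of numbers.
--
--     A grid fact or an area fact should be defined first.
--     """
--     color_part = "" if color is None else f"; {color}(R, C)"
--
--     _range = sorted(set(_range))  # canonicize the range
--     i, range_seq = 0, []
--
--     while i < len(_range):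
--         start = i
--         while i < len(_range) - 1 and _range[i + 1] - _range[i] == 1:
--             i += 1
--         end = i
--         if start < end:
--             range_seq.append(f"{_range[start]}..{_range[end]}")
--         else:
--             range_seq.append(str(_range[start]))
--         i += 1
--
--     range_str = f"{';'.join(range_seq)}"
--
--     if _type == "grid":
--         return f"{{ number(R, C, ({range_str})){color_part} }} = 1 :- grid(R, C)."
--
--     if _type == "area":
--         return f"{{ number(R, C, ({range_str})){color_part} }} = 1 :- area({_id}, R, C)."
--
--     raise AssertionError("Invalid type, must be one of 'grid', 'area'.")
-- ===== SOURCE B (Python) =====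
-- from typing import Iterable, Optional, Union
--
-- def fill_num(_range: Iterable[int], _type: str = "grid", _id: Union[int, str] = "A", color: Optional[str] = None) -> str:
--     color_part = "" if color is None else f"; {color}(R, C)"
--
--     s = set(_range)
--     vals = sorted(s)
--     # A run of consecutive integers starts at v iff v-1 is absent from the set,
--     # and ends at v iff v+1 is absent; sorted starts pair with sorted ends.
--     starts = [v for v in vals if v - 1 not in s]
--     ends = [v for v in vals if v + 1 not in s]
--     range_seq = [f"{a}..{b}" if a < b else str(a) for a, b in zip(starts, ends)]
--     range_str = ";".join(range_seq)
--
--     if _type == "grid":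
--         return f"{{ number(R, C, ({range_str})){color_part} }} = 1 :- grid(R, C)."
--
--     if _type == "area":
--         return f"{{ number(R, C, ({range_str})){color_part} }} = 1 :- area({_id}, R, C)."
--
--     raise AssertionError("Invalid type, must be one of 'grid', 'area'.")
-- ===== Notes on version B (the rewrite author's own statement) =====
-- stated objective: alternative
-- what changed: Run boundaries are computed by set membership (v starts a run iff v-1 is absent from the set, ends a run iff v+1 is absent) and the sorted starts are zipped with the sorted ends, replacing A's index-walking scan over adjacent differences.
import Mathlib
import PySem

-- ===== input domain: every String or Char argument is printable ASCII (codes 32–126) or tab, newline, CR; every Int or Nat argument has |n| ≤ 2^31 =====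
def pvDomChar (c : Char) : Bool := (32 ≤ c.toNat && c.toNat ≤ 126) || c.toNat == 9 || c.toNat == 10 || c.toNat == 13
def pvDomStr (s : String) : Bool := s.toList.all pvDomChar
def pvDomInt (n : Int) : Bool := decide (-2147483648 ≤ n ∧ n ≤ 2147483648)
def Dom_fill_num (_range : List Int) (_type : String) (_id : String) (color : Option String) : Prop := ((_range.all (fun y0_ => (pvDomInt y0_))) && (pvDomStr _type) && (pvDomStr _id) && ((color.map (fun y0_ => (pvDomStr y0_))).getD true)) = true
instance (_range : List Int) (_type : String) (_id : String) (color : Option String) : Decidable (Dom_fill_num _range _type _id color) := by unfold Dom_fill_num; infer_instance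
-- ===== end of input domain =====

-- B finds run boundaries by set membership (v starts a run iff v-1 is absent, ends one iff v+1 is
-- absent) and zips sorted starts with sorted ends, instead of A's index-walking adjacency scan;
-- an alternative algorithm of the same cost.

-- ===== PORT A =====
-- inner while: 'while i < len(_range) - 1 and _range[i + 1] - _range[i] == 1: i += 1'
def pvInnerA (xs : List Int) (i : Nat) : Nat :=
  if h : i + 1 < xs.length ∧ xs.getD (i + 1) 0 - xs.getD i 0 = 1 then
    pvInnerA xs (i + 1)
  else i
termination_by xs.length - i
decreasing_by obtain ⟨h1, -⟩ := h; omega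

theorem pvInnerA_ge (xs : List Int) (i : Nat) : i ≤ pvInnerA xs i := by
  fun_induction pvInnerA xs i with
  | case1 i h ih => omega
  | case2 i h => omega

-- outer while over index i, appending one entry per run
def pvLoopA (xs : List Int) (i : Nat) (seq : List String) : List String :=
  if _h : i < xs.length then
    let e := pvInnerA xs i
    let entry :=
      if i < e then
        PySem.Int.toStr (xs.getD i 0) ++ ".." ++ PySem.Int.toStr (xs.getD e 0)
      else
        PySem.Int.toStr (xs.getD i 0)
    pvLoopA xs (e + 1) (seq ++ [entry])
  else seq
termination_by xs.length - i
decreasing_by have := pvInnerA_ge xs i; omega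

def fill_num (_range : List Int) (_type : String) (_id : String) (color : Option String) : String :=
  let color_part := match color with
    | none => ""
    | some c => "; " ++ c ++ "(R, C)"
  let vals := PySem.List.sorted (PySem.Set.ofList _range) (fun x => x) false
  let range_str := PySem.Str.join ";" (pvLoopA vals 0 [])
  if _type == "grid" then
    "{ number(R, C, (" ++ range_str ++ "))" ++ color_part ++ " } = 1 :- grid(R, C)."
  else if _type == "area" then
    "{ number(R, C, (" ++ range_str ++ "))" ++ color_part ++ " } = 1 :- area(" ++ _id ++ ", R, C)."
  else "" -- Python raises AssertionError here; these inputs are excluded by Pre_fill_num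

-- ===== PORT B =====
def fill_num_alt (_range : List Int) (_type : String) (_id : String) (color : Option String) : String :=
  let color_part := match color with
    | none => ""
    | some c => "; " ++ c ++ "(R, C)"
  let s := PySem.Set.ofList _range
  let vals := PySem.List.sorted s (fun x => x) false
  -- starts = [v for v in vals if v - 1 not in s]; ends = [v for v in vals if v + 1 not in s]
  let starts := vals.filter (fun v => !(PySem.Set.contains s (v - 1)))
  let ends := vals.filter (fun v => !(PySem.Set.contains s (v + 1)))
  let range_seq := (starts.zip ends).map (fun p =>
    if p.1 < p.2 then PySem.Int.toStr p.1 ++ ".." ++ PySem.Int.toStr p.2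
    else PySem.Int.toStr p.1)
  let range_str := PySem.Str.join ";" range_seq
  if _type == "grid" then
    "{ number(R, C, (" ++ range_str ++ "))" ++ color_part ++ " } = 1 :- grid(R, C)."
  else if _type == "area" then
    "{ number(R, C, (" ++ range_str ++ "))" ++ color_part ++ " } = 1 :- area(" ++ _id ++ ", R, C)."
  else "" -- Python raises AssertionError here; these inputs are excluded by Pre_fill_num

-- ===== PRECONDITION & SPEC =====
-- Pre_ excludes exactly the inputs where A raises AssertionError (_type not 'grid'/'area').
def Pre_fill_num (_range : List Int) (_type : String) (_id : String) (color : Option String) : Prop :=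
  _type = "grid" ∨ _type = "area"
instance (_range : List Int) (_type : String) (_id : String) (color : Option String) : Decidable (Pre_fill_num _range _type _id color) := by unfold Pre_fill_num; infer_instance

def pvWitness_fill_num : List Int × String × String × Option String := ([1, 2, 3, 5], "grid", "A", none)

def Spec_fill_num (_range : List Int) (_type : String) (_id : String) (color : Option String) (out : String) : Prop := out = fill_num_alt _range _type _id color
instance (_range : List Int) (_type : String) (_id : String) (color : Option String) (out : String) : Decidable (Spec_fill_num _range _type _id color out) := by unfold Spec_fill_num; infer_instance

-- ===== CLAIM (what is proved, stated in full; the proofs are below) =====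
def Claim_equal_fill_num : Prop := ∀ (_range : List Int) (_type : String) (_id : String) (color : Option String), Dom_fill_num _range _type _id color → Pre_fill_num _range _type _id color → Spec_fill_num _range _type _id color (fill_num _range _type _id color)

-- ===== LEMMAS AND PROOFS =====

-- maximal runs of consecutive (+1) integers, built back to front
def pvChunks : List Int → List (List Int)
  | [] => []
  | x :: t =>
    match pvChunks t with
    | (y :: g) :: gs => if y - x = 1 then (x :: y :: g) :: gs else [x] :: (y :: g) :: gs
    | gs => [x] :: gs

-- A's per-run formatter on a run's value list
def pvFmtV (g : List Int) : String :=
  if 1 < g.length then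
    PySem.Int.toStr (PySem.List.pyGetD g 0 0) ++ ".." ++ PySem.Int.toStr (PySem.List.pyGetD g (-1) 0)
  else
    PySem.Int.toStr (PySem.List.pyGetD g 0 0)

-- B's boundary filters, with membership phrased over the same list
def pvStarts (xs : List Int) : List Int := xs.filter (fun v => !decide ((v - 1) ∈ xs))
def pvEnds (xs : List Int) : List Int := xs.filter (fun v => !decide ((v + 1) ∈ xs))

theorem pvChunks_cons_head (y : Int) (t : List Int) :
    ∃ g gs, pvChunks (y :: t) = (y :: g) :: gs := by
  unfold pvChunks
  rcases h : pvChunks t with _ | ⟨_ | ⟨z, g'⟩, gs⟩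
  · exact ⟨[], [], rfl⟩
  · exact ⟨[], _, rfl⟩
  · by_cases hz : z - y = 1
    · exact ⟨z :: g', gs, by simp [hz]⟩
    · exact ⟨[], (z :: g') :: gs, by simp [hz]⟩

theorem pvChunks_cons_eq (x z : Int) (t g' : List Int) (gs' : List (List Int))
    (h : pvChunks t = (z :: g') :: gs') :
    pvChunks (x :: t) = if z - x = 1 then (x :: z :: g') :: gs' else [x] :: (z :: g') :: gs' := by
  have e : pvChunks (x :: t) = match pvChunks t with
    | (z :: g') :: gs' => if z - x = 1 then (x :: z :: g') :: gs' else [x] :: (z :: g') :: gs'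
    | gs' => [x] :: gs' := rfl
  rw [e, h]

-- ---------- A-side: pvLoopA computes the chunk formatting ----------

theorem pvInnerA_lt (xs : List Int) (i : Nat) (h : i < xs.length) : pvInnerA xs i < xs.length := by
  fun_induction pvInnerA xs i with
  | case1 i h' ih => exact ih (by omega)
  | case2 i h' => omega

theorem pvInnerA_spec (xs : List Int) : ∀ n i, xs.length - i ≤ n → i < xs.length →
    pvChunks (xs.drop i) =
      ((xs.drop i).take (pvInnerA xs i + 1 - i)) :: pvChunks (xs.drop (pvInnerA xs i + 1)) := by
  intro n
  induction n with
  | zero => intro i h1 h2; omega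
  | succ n ih =>
    intro i hle hi
    have hdropi : xs.drop i = xs[i] :: xs.drop (i + 1) := List.drop_eq_getElem_cons hi
    by_cases hcond : i + 1 < xs.length ∧ xs.getD (i + 1) 0 - xs.getD i 0 = 1
    · have hE : pvInnerA xs i = pvInnerA xs (i + 1) := by rw [pvInnerA, dif_pos hcond]
      obtain ⟨hi1, hdiff⟩ := hcond
      have hge : i + 1 ≤ pvInnerA xs (i + 1) := pvInnerA_ge xs (i + 1)
      have hlt : pvInnerA xs (i + 1) < xs.length := pvInnerA_lt xs (i + 1) hi1
      have hIH := ih (i + 1) (by omega) hi1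
      have hdropi1 : xs.drop (i + 1) = xs[i + 1] :: xs.drop (i + 2) :=
        List.drop_eq_getElem_cons hi1
      have hdiff' : xs[i + 1] - xs[i] = 1 := by
        rwa [List.getD_eq_getElem xs 0 hi1, List.getD_eq_getElem xs 0 hi] at hdiff
      set E := pvInnerA xs (i + 1) with hEdef
      have htake1 : (xs.drop (i + 1)).take (E + 1 - (i + 1))
          = xs[i + 1] :: (xs.drop (i + 2)).take (E - i - 1) := by
        rw [hdropi1]
        have : E + 1 - (i + 1) = (E - i - 1) + 1 := by omega
        rw [this, List.take_succ_cons]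
      have hform := pvChunks_cons_eq xs[i] xs[i + 1] (xs.drop (i + 1))
        ((xs.drop (i + 2)).take (E - i - 1)) (pvChunks (xs.drop (E + 1)))
        (by rw [hIH, htake1])
      have htake2 : (xs[i] :: xs.drop (i + 1)).take (E + 1 - i)
          = xs[i] :: xs[i + 1] :: (xs.drop (i + 2)).take (E - i - 1) := by
        have : E + 1 - i = ((E - i - 1) + 1) + 1 := by omega
        rw [this, List.take_succ_cons, hdropi1, List.take_succ_cons]
      rw [hE, hdropi, hform, if_pos hdiff', htake2]
    · have hE : pvInnerA xs i = i := by rw [pvInnerA, dif_neg hcond]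
      rw [hE]
      have htake : (xs.drop i).take (i + 1 - i) = [xs[i]] := by
        rw [hdropi]
        have : i + 1 - i = 1 := by omega
        rw [this, List.take_succ_cons, List.take_zero]
      rw [htake]
      by_cases hi1 : i + 1 < xs.length
      · have hdiff : xs[i + 1] - xs[i] ≠ 1 := by
          intro hc
          exact hcond ⟨hi1, by rwa [List.getD_eq_getElem xs 0 hi1, List.getD_eq_getElem xs 0 hi]⟩
        have hdropi1 : xs.drop (i + 1) = xs[i + 1] :: xs.drop (i + 2) :=
          List.drop_eq_getElem_cons hi1
        obtain ⟨g, gs, hg⟩ := pvChunks_cons_head xs[i + 1] (xs.drop (i + 2))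
        have hform := pvChunks_cons_eq xs[i] xs[i + 1] (xs.drop (i + 1)) g gs
          (by rw [hdropi1, hg])
        rw [hdropi, hform, if_neg hdiff, hdropi1, hg]
      · have hnil : xs.drop (i + 1) = [] := List.drop_eq_nil_of_le (by omega)
        rw [hdropi, hnil]
        rfl

theorem pvLoopA_entry (xs : List Int) (i : Nat) (hi : i < xs.length) :
    (if i < pvInnerA xs i then
        PySem.Int.toStr (xs.getD i 0) ++ ".." ++ PySem.Int.toStr (xs.getD (pvInnerA xs i) 0)
      else PySem.Int.toStr (xs.getD i 0))
      = pvFmtV ((xs.drop i).take (pvInnerA xs i + 1 - i)) := by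
  have hge : i ≤ pvInnerA xs i := pvInnerA_ge xs i
  have hlt : pvInnerA xs i < xs.length := pvInnerA_lt xs i hi
  set E := pvInnerA xs i with hEdef
  set g := (xs.drop i).take (E + 1 - i) with hgdef
  have hlen : g.length = E + 1 - i := by
    rw [hgdef, List.length_take, List.length_drop]; omega
  have hcons : g = xs[i] :: (xs.drop (i + 1)).take (E - i) := by
    rw [hgdef, List.drop_eq_getElem_cons hi,
      show E + 1 - i = (E - i) + 1 by omega, List.take_succ_cons]
  have hhead : PySem.List.pyGetD g 0 0 = xs[i] := by
    rw [hcons, PySem.List.pyGetD_zero_cons]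
  have hne : g ≠ [] := by rw [hcons]; simp
  have key : ∀ (j : ℕ) (hj : j < g.length) (hb : i + j < xs.length),
      g[j]'hj = xs[i + j]'hb := by
    intro j hj hb
    rw [List.getElem_of_eq hgdef hj]
    simp [List.getElem_take, List.getElem_drop]
  have hlast : PySem.List.pyGetD g (-1) 0 = xs[E] := by
    rw [PySem.List.pyGetD_neg_one g 0 hne, List.getLast_eq_getElem,
      key (g.length - 1) (by omega) (by omega)]
    congr 1
    omega
  have hgi : xs.getD i 0 = xs[i] := List.getD_eq_getElem xs 0 hi
  have hgE : xs.getD E 0 = xs[E] := List.getD_eq_getElem xs 0 hlt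
  unfold pvFmtV
  by_cases hiE : i < E
  · rw [if_pos hiE, if_pos (by omega : 1 < g.length), hhead, hlast, hgi, hgE]
  · have : E = i := by omega
    rw [if_neg hiE, if_neg (by omega : ¬ 1 < g.length), hhead, hgi]

theorem pvLoopA_spec (xs : List Int) : ∀ n (i : Nat) (seq : List String), xs.length - i ≤ n →
    pvLoopA xs i seq = seq ++ (pvChunks (xs.drop i)).map pvFmtV := by
  intro n
  induction n with
  | zero =>
    intro i seq h
    have hge : xs.length ≤ i := by omega
    rw [pvLoopA, dif_neg (by omega : ¬ i < xs.length),
      List.drop_eq_nil_of_le hge]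
    simp [pvChunks]
  | succ n ih =>
    intro i seq hle
    by_cases hi : i < xs.length
    · have hge : i ≤ pvInnerA xs i := pvInnerA_ge xs i
      have hlt : pvInnerA xs i < xs.length := pvInnerA_lt xs i hi
      rw [pvLoopA, dif_pos hi]
      simp only
      rw [ih (pvInnerA xs i + 1) _ (by omega),
        pvInnerA_spec xs (xs.length - i) i (by omega) hi, List.map_cons,
        pvLoopA_entry xs i hi, List.append_assoc, List.singleton_append]
    · rw [pvLoopA, dif_neg hi, List.drop_eq_nil_of_le (by omega)]
      simp [pvChunks]

-- ---------- B-side: the boundary filters compute chunk heads and lasts ----------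

theorem pvChunks_sublist (xs : List Int) : ∀ g ∈ pvChunks xs, g.Sublist xs := by
  induction xs with
  | nil => intro g hg; simp [pvChunks] at hg
  | cons x t ih =>
    intro g hg
    rcases h : pvChunks t with _ | ⟨_ | ⟨z, g'⟩, gs⟩ <;>
      rw [pvChunks, h] at hg <;> dsimp only at hg
    · simp at hg
      simp [hg]
    · rcases List.mem_cons.mp hg with h1 | h1
      · simp [h1]
      · exact (ih g (by rw [h]; exact h1)).cons x
    · by_cases hz : z - x = 1
      · rw [if_pos hz] at hg
        rcases List.mem_cons.mp hg with h1 | h1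
        · subst h1
          exact (ih (z :: g') (by rw [h]; exact List.mem_cons_self)).cons₂ x
        · exact (ih g (by rw [h]; exact List.mem_cons_of_mem _ h1)).cons x
      · rw [if_neg hz] at hg
        rcases List.mem_cons.mp hg with h1 | h1
        · simp [h1]
        · exact (ih g (by rw [h]; exact h1)).cons x

theorem pvChunks_ne_nil (xs : List Int) : ∀ g ∈ pvChunks xs, g ≠ [] := by
  induction xs with
  | nil => intro g hg; simp [pvChunks] at hg
  | cons x t ih =>
    intro g hg
    rcases h : pvChunks t with _ | ⟨_ | ⟨z, g'⟩, gs⟩ <;>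
      rw [pvChunks, h] at hg <;> dsimp only at hg
    · simp at hg; simp [hg]
    · rcases List.mem_cons.mp hg with h1 | h1
      · simp [h1]
      · exact ih g (by rw [h]; exact h1)
    · by_cases hz : z - x = 1
      · rw [if_pos hz] at hg
        rcases List.mem_cons.mp hg with h1 | h1
        · simp [h1]
        · exact ih g (by rw [h]; exact List.mem_cons_of_mem _ h1)
      · rw [if_neg hz] at hg
        rcases List.mem_cons.mp hg with h1 | h1
        · simp [h1]
        · exact ih g (by rw [h]; exact h1)

theorem pvSE (xs : List Int) (hpw : xs.Pairwise (· < ·)) :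
    pvStarts xs = (pvChunks xs).map (fun g => g.headD 0) ∧
    pvEnds xs = (pvChunks xs).map (fun g => g.getLastD 0) := by
  induction xs with
  | nil => simp [pvStarts, pvEnds, pvChunks]
  | cons x t ih =>
    rcases List.pairwise_cons.mp hpw with ⟨hx, hpt⟩
    obtain ⟨ihS, ihE⟩ := ih hpt
    cases t with
    | nil =>
      constructor
      · simp [pvStarts, pvChunks]
      · simp [pvEnds, pvChunks]
    | cons y t' =>
      have hxy : x < y := hx y List.mem_cons_self
      have hyt' : ∀ v ∈ t', y < v := (List.pairwise_cons.mp hpt).1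
      obtain ⟨g, gs, hg⟩ := pvChunks_cons_head y t'
      have hform := pvChunks_cons_eq x y (y :: t') g gs hg
      -- membership of boundary probes
      have hxm1 : x - 1 ∉ x :: y :: t' := by
        intro hm
        rcases List.mem_cons.mp hm with h1 | hm
        · omega
        rcases List.mem_cons.mp hm with h1 | hm
        · omega
        · have := hx _ (List.mem_cons_of_mem _ hm); omega
      have hym1t : y - 1 ∉ y :: t' := by
        intro hm
        rcases List.mem_cons.mp hm with h1 | hm
        · omega
        · have := hyt' _ hm; omega
      by_cases hadj : y - x = 1
      · -- merged chunk (x :: y :: g) :: gs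
        rw [if_pos hadj] at hform
        constructor
        · -- starts
          have hIH : List.filter (fun v => !decide ((v - 1) ∈ y :: t')) (y :: t')
              = y :: gs.map (fun g => g.headD 0) := by
            have h0 := ihS
            rw [hg, pvStarts] at h0
            simpa using h0
          rw [List.filter_cons, if_pos (by simp [hym1t])] at hIH
          have htail : t'.filter (fun v => !decide ((v - 1) ∈ y :: t'))
              = gs.map (fun g => g.headD 0) := by
            injection hIH
          rw [pvStarts, hform]
          rw [List.filter_cons, if_pos (by simp [hxm1]),
            List.filter_cons, if_neg (by simp; omega)]
          have hcongr : t'.filter (fun v => !decide ((v - 1) ∈ x :: y :: t'))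
              = t'.filter (fun v => !decide ((v - 1) ∈ y :: t')) := by
            apply List.filter_congr
            intro v hv
            have hvy := hyt' v hv
            simp only [List.mem_cons]
            have : ¬ (v - 1 = x) := by omega
            simp [this]
          rw [hcongr, htail]
          rfl
        · -- ends
          have hIH : pvEnds (y :: t') = (y :: g).getLastD 0 :: gs.map (fun g => g.getLastD 0) := by
            rw [ihE, hg]; rfl
          rw [pvEnds, hform]
          rw [List.filter_cons, if_neg (by simp; intro h; exact (h (by omega)).elim)]
          have hcongr : (y :: t').filter (fun v => !decide ((v + 1) ∈ x :: y :: t'))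
              = (y :: t').filter (fun v => !decide ((v + 1) ∈ y :: t')) := by
            apply List.filter_congr
            intro v hv
            have hvy : y ≤ v := by
              rcases List.mem_cons.mp hv with h1 | h1
              · omega
              · have := hyt' v h1; omega
            simp only [List.mem_cons]
            have : ¬ (v + 1 = x) := by omega
            simp [this]
          rw [hcongr]
          rw [pvEnds] at hIH
          rw [hIH]
          simp [List.getLastD]
      · -- separate chunks [x] :: (y :: g) :: gs
        rw [if_neg hadj] at hform
        have hxp1 : x + 1 ∉ x :: y :: t' := by
          intro hm
          rcases List.mem_cons.mp hm with h1 | hm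
          · omega
          rcases List.mem_cons.mp hm with h1 | hm
          · omega
          · have := hyt' _ hm; omega
        constructor
        · rw [pvStarts, hform]
          rw [List.filter_cons, if_pos (by simp [hxm1])]
          have hcongr : (y :: t').filter (fun v => !decide ((v - 1) ∈ x :: y :: t'))
              = (y :: t').filter (fun v => !decide ((v - 1) ∈ y :: t')) := by
            apply List.filter_congr
            intro v hv
            have hvy : y ≤ v := by
              rcases List.mem_cons.mp hv with h1 | h1
              · omega
              · have := hyt' v h1; omega
            simp only [List.mem_cons]
            have : ¬ (v - 1 = x) := by omega
            simp [this]
          rw [hcongr]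
          rw [pvStarts] at ihS
          rw [ihS, hg]
          rfl
        · rw [pvEnds, hform]
          rw [List.filter_cons, if_pos (by simp [hxp1])]
          have hcongr : (y :: t').filter (fun v => !decide ((v + 1) ∈ x :: y :: t'))
              = (y :: t').filter (fun v => !decide ((v + 1) ∈ y :: t')) := by
            apply List.filter_congr
            intro v hv
            have hvy : y ≤ v := by
              rcases List.mem_cons.mp hv with h1 | h1
              · omega
              · have := hyt' v h1; omega
            simp only [List.mem_cons]
            have : ¬ (v + 1 = x) := by omega
            simp [this]
          rw [hcongr]
          rw [pvEnds] at ihE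
          rw [ihE, hg]
          rfl

-- per-chunk: B's (head, last) formatting equals A's pvFmtV on a nonempty strictly sorted list
theorem pvFmt_of_chunk (g : List Int) (hne : g ≠ []) (hpw : g.Pairwise (· < ·)) :
    (if g.headD 0 < g.getLastD 0 then
        PySem.Int.toStr (g.headD 0) ++ ".." ++ PySem.Int.toStr (g.getLastD 0)
      else PySem.Int.toStr (g.headD 0)) = pvFmtV g := by
  cases g with
  | nil => exact absurd rfl hne
  | cons a rest =>
    cases rest with
    | nil =>
      unfold pvFmtV
      rw [if_neg (by simp), if_neg (by simp)]
      simp [PySem.List.pyGetD_zero_cons]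
    | cons b rest' =>
      have hlast : (a :: b :: rest').getLastD 0 = (a :: b :: rest').getLast (by simp) := by
        rw [List.getLastD_eq_getLast?, List.getLast?_eq_some_getLast (by simp)]
        rfl
      have hmem : (a :: b :: rest').getLast (by simp) ∈ b :: rest' := by
        rw [List.getLast_cons (by simp)]
        exact List.getLast_mem _
      have halt : a < (a :: b :: rest').getLast (by simp) :=
        (List.pairwise_cons.mp hpw).1 _ hmem
      have hcond : (a :: b :: rest').headD 0 < (a :: b :: rest').getLastD 0 := by
        rw [hlast]; exact halt
      unfold pvFmtV
      rw [if_pos hcond, if_pos (by simp : 1 < (a :: b :: rest').length)]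
      rw [PySem.List.pyGetD_neg_one _ 0 (by simp)]
      rw [← hlast, PySem.List.pyGetD_zero_cons]
      rfl

-- B's range_seq equals A's, for xs = sorted(set(_range))
theorem pvBA (r : List Int) :
    (((PySem.List.sorted (PySem.Set.ofList r) (fun x => x) false).filter
        (fun v => !(PySem.Set.contains (PySem.Set.ofList r) (v - 1)))).zip
      ((PySem.List.sorted (PySem.Set.ofList r) (fun x => x) false).filter
        (fun v => !(PySem.Set.contains (PySem.Set.ofList r) (v + 1))))).map (fun p =>
          if p.1 < p.2 then PySem.Int.toStr p.1 ++ ".." ++ PySem.Int.toStr p.2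
          else PySem.Int.toStr p.1)
      = pvLoopA (PySem.List.sorted (PySem.Set.ofList r) (fun x => x) false) 0 [] := by
  set s := PySem.Set.ofList r with hs
  set vals := PySem.List.sorted s (fun x => x) false with hvals
  have hpw : vals.Pairwise (· < ·) := PySem.List.sorted_ofList_pairwise_lt r
  have hmem : ∀ a : Int, PySem.Set.contains s a = decide (a ∈ vals) := by
    intro a
    rw [Bool.eq_iff_iff, PySem.Set.contains_iff, decide_eq_true_eq, hvals,
      PySem.List.mem_sorted]
  have hfilS : vals.filter (fun v => !(PySem.Set.contains s (v - 1))) = pvStarts vals := by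
    rw [pvStarts]; apply List.filter_congr; intro v _; rw [hmem]
  have hfilE : vals.filter (fun v => !(PySem.Set.contains s (v + 1))) = pvEnds vals := by
    rw [pvEnds]; apply List.filter_congr; intro v _; rw [hmem]
  obtain ⟨hS, hE⟩ := pvSE vals hpw
  rw [hfilS, hfilE, hS, hE, List.zip_map', List.map_map,
    pvLoopA_spec vals vals.length 0 [] (by omega), List.drop_zero, List.nil_append]
  apply List.map_congr_left
  intro g hg
  exact pvFmt_of_chunk g (pvChunks_ne_nil vals g hg)
    (List.Pairwise.sublist (pvChunks_sublist vals g hg) hpw)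

-- ===== VERDICT (by name: the statement is the Claim_ definition above) =====
theorem fill_num_spec : Claim_equal_fill_num := by
  intro _range _type _id color _dom _pre
  simp only [Spec_fill_num, fill_num, fill_num_alt, pvBA]
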